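-- pv_equiv track=rewrite | github.com/HanSur94/FastSense | scripts/generate_api_docs.py | _find_comment_pct
-- ===== SOURCE A (Python) =====
-- def _find_comment_pct(line: str) -> int:
--     """Find index of first % that is not inside a string literal."""
--     in_single = False
--     for i, ch in enumerate(line):
--         if ch == "'" and not in_single:
--             in_single = True
--         elif ch == "'" and in_single:
--             in_single = False
--         elif ch == "%" and not in_single:
--             return i
--     return -1
-- ===== SOURCE B (Python) =====
-- def _find_comment_pct(line: str) -> int:
--     """Find index of first % that is not inside a string literal."""
--     parts = line.split("'")
--     offset = 0
--     while parts:
--         p = parts[0]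
--         j = p.find('%')
--         if j != -1:
--             return offset + j
--         if len(parts) == 1:
--             return -1
--         offset += len(p) + 1 + len(parts[1]) + 1
--         parts = parts[2:]
--     return -1
-- ===== Notes on version B (the rewrite author's own statement) =====
-- stated objective: faster
-- what changed: Replaces the char-by-char in_single state machine with a split on apostrophes: segments alternate outside/inside quotes, so B walks segment pairs with a running offset and uses str.find on each unquoted segment (C-level split/find instead of a Python-level per-character loop).
import Mathlib
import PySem

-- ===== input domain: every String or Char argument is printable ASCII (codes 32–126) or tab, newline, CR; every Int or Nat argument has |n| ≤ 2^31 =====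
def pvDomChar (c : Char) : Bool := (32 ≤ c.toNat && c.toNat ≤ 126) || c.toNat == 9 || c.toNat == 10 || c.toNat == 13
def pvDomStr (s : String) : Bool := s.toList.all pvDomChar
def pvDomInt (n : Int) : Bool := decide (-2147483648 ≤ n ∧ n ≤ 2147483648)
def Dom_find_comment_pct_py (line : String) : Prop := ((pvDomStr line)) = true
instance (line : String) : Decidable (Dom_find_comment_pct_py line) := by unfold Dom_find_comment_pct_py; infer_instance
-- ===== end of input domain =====

-- B replaces A's char-by-char in_single state machine by split("'") + find('%') on the
-- even (unquoted) segments with a running offset (objective: alternative decomposition).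

-- ===== PORT A =====
-- the for-loop of A: index i, state in_single, branches in A's order
def aGo : List Char → Int → Bool → Int
  | [], _, _ => -1
  | ch :: rest, i, in_single =>
    if ch == '\'' && !in_single then aGo rest (i + 1) true
    else if ch == '\'' && in_single then aGo rest (i + 1) false
    else if ch == '%' && !in_single then i
    else aGo rest (i + 1) in_single

def find_comment_pct_py (line : String) : Int := aGo line.toList 0 false

-- ===== PORT B =====
-- the while-loop of Source B: parts still to process, running offset
-- (the singleton case is Source B's "if len(parts) == 1: return -1")
def bGo : List (List Char) → Int → Int
  | [], _ => -1
  | [p], offset =>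
    let j := PySem.Chars.find p ['%']
    if j ≠ -1 then offset + j else -1
  | p :: q :: rest', offset =>
    let j := PySem.Chars.find p ['%']
    if j ≠ -1 then offset + j
    else bGo rest' (offset + p.length + 1 + q.length + 1)

def find_comment_pct_py_alt (line : String) : Int :=
  bGo (PySem.Chars.splitOn line.toList ['\'']) 0

-- ===== PRECONDITION & SPEC =====
def Spec_find_comment_pct_py (line : String) (out : Int) : Prop := out = find_comment_pct_py_alt line
instance (line : String) (out : Int) : Decidable (Spec_find_comment_pct_py line out) := by unfold Spec_find_comment_pct_py; infer_instance

-- ===== CLAIM (what is proved, stated in full; the proofs are below) =====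
def Claim_equal_find_comment_pct_py : Prop := ∀ (line : String), Dom_find_comment_pct_py line → Spec_find_comment_pct_py line (find_comment_pct_py line)

-- ===== LEMMAS AND PROOFS =====

-- proof-side recursive characterisation of split on a single apostrophe:
-- (first segment, remaining segments)
def split1 : List Char → List Char × List (List Char)
  | [] => ([], [])
  | c :: t =>
    let r := split1 t
    if c = '\'' then ([], r.1 :: r.2) else (c :: r.1, r.2)

theorem splitOn_go_eq (fuel : Nat) : ∀ (l cur : List Char) (acc : List (List Char)),
    l.length ≤ fuel →
    PySem.Chars.splitOn.go ['\''] fuel l cur acc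
      = acc.reverse ++ ((cur.reverse ++ (split1 l).1) :: (split1 l).2) := by
  induction fuel with
  | zero =>
    intro l cur acc h
    have : l = [] := List.eq_nil_of_length_eq_zero (Nat.le_zero.mp h)
    subst this
    simp [PySem.Chars.splitOn.go, split1]
  | succ n ih =>
    intro l cur acc h
    cases l with
    | nil => simp [PySem.Chars.splitOn.go, split1]
    | cons c rest =>
      by_cases hc : c = '\''
      · subst hc
        have hpre : List.isPrefixOf ['\''] ('\'' :: rest) = true := by
          simp [List.isPrefixOf]
        rw [PySem.Chars.splitOn.go]
        simp only [hpre, if_true]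
        rw [show List.drop (['\''].length) ('\'' :: rest) = rest from rfl]
        rw [ih rest [] (cur.reverse :: acc) (by simpa using Nat.le_of_succ_le_succ h)]
        simp [split1]
      · have hpre : List.isPrefixOf ['\''] (c :: rest) = false := by
          simp [List.isPrefixOf]
          exact fun hh => absurd hh.symm hc
        rw [PySem.Chars.splitOn.go]
        simp only [hpre]
        rw [ih rest (c :: cur) acc (by simpa using Nat.le_of_succ_le_succ h)]
        simp [split1, hc]

theorem splitOn_eq_split1 (l : List Char) :
    PySem.Chars.splitOn l ['\''] = (split1 l).1 :: (split1 l).2 := by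
  rw [PySem.Chars.splitOn, splitOn_go_eq (l.length + 1) l [] [] (by omega)]
  simp

theorem split1_quote (rest : List Char) :
    split1 ('\'' :: rest) = ([], (split1 rest).1 :: (split1 rest).2) := by
  simp [split1]

theorem split1_other (c : Char) (rest : List Char) (hc : c ≠ '\'') :
    split1 (c :: rest) = (c :: (split1 rest).1, (split1 rest).2) := by
  simp [split1, hc]

-- find with a one-char needle, shifted start
theorem find_go_shift (t : List Char) : ∀ k : Nat,
    PySem.Chars.find.go ['%'] t k
      = if PySem.Chars.find.go ['%'] t 0 = -1 then -1
        else (k : Int) + PySem.Chars.find.go ['%'] t 0 := by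
  induction t with
  | nil => intro k; simp [PySem.Chars.find.go]
  | cons c t ih =>
    intro k
    by_cases hc : c = '%'
    · subst hc
      have hpre : List.isPrefixOf ['%'] ('%' :: t) = true := by simp [List.isPrefixOf]
      have e : ∀ m : Nat, PySem.Chars.find.go ['%'] ('%' :: t) m = m := by
        intro m; rw [PySem.Chars.find.go]; simp [hpre]
      rw [e, e]; simp
    · have hpre : List.isPrefixOf ['%'] (c :: t) = false := by
        simp [List.isPrefixOf]
        exact fun hh => absurd hh.symm hc
      rw [PySem.Chars.find.go, PySem.Chars.find.go]
      simp only [hpre, Bool.false_eq_true, if_false]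
      rw [ih (k + 1), ih 1]
      have hb : -1 ≤ PySem.Chars.find.go ['%'] t 0 := by
        have := PySem.Chars.neg_one_le_find t ['%']
        simpa only [PySem.Chars.find] using this
      split_ifs <;> push_cast <;> omega

theorem find_nil_pct : PySem.Chars.find [] ['%'] = -1 := by
  simp [PySem.Chars.find, PySem.Chars.find.go]

theorem find_cons_pct_hit (t : List Char) : PySem.Chars.find ('%' :: t) ['%'] = 0 := by
  have hpre : List.isPrefixOf ['%'] ('%' :: t) = true := by simp [List.isPrefixOf]
  rw [PySem.Chars.find, PySem.Chars.find.go]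
  simp [hpre]

theorem find_cons_pct_miss (c : Char) (t : List Char) (hc : c ≠ '%') :
    PySem.Chars.find (c :: t) ['%']
      = if PySem.Chars.find t ['%'] = -1 then -1 else PySem.Chars.find t ['%'] + 1 := by
  have hpre : List.isPrefixOf ['%'] (c :: t) = false := by
    simp [List.isPrefixOf]
    exact fun hh => absurd hh.symm hc
  rw [PySem.Chars.find, PySem.Chars.find.go]
  simp only [hpre, Bool.false_eq_true, if_false]
  rw [find_go_shift t 1]
  rw [PySem.Chars.find]
  by_cases h0 : PySem.Chars.find.go ['%'] t 0 = -1
  · simp [h0]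
  · simp only [h0, if_false]
    ring

theorem find_lb (t : List Char) : -1 ≤ PySem.Chars.find t ['%'] :=
  PySem.Chars.neg_one_le_find t ['%']

-- shifting a non-% head char out of the first segment
theorem bGo_cons_shift (c : Char) (hc : c ≠ '%') (h : List Char)
    (rest : List (List Char)) (off : Int) :
    bGo ((c :: h) :: rest) off = bGo (h :: rest) (off + 1) := by
  have hb := find_lb h
  cases rest with
  | nil =>
    rw [bGo, bGo, find_cons_pct_miss c h hc]
    split_ifs <;> omega
  | cons q rest' =>
    rw [bGo, bGo, find_cons_pct_miss c h hc]
    split_ifs <;>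
      first
        | omega
        | (congr 1; push_cast [List.length_cons]; ring)

-- the main invariant: A's loop in both states against B's walk over split1
theorem main_inv (cs : List Char) : ∀ off : Int,
    (aGo cs off false = bGo ((split1 cs).1 :: (split1 cs).2) off) ∧
    (aGo cs off true
      = match (split1 cs).2 with
        | [] => -1
        | h2 :: r => bGo (h2 :: r) (off + (split1 cs).1.length + 1)) := by
  induction cs with
  | nil =>
    intro off
    constructor
    · simp [aGo, bGo, split1, find_nil_pct]
    · simp [aGo, split1]
  | cons c rest ih =>
    intro off
    by_cases hq : c = '\''
    · subst hq
      constructor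
      · rw [show aGo ('\'' :: rest) off false = aGo rest (off + 1) true from by
          simp [aGo]]
        rw [(ih (off + 1)).2, split1_quote]
        cases hr : (split1 rest).2 with
        | nil =>
          rw [bGo, bGo]
          simp [find_nil_pct]
        | cons h2 r =>
          rw [bGo]
          simp only [find_nil_pct, ne_eq, not_true_eq_false, if_false]
          congr 1
          simp
      · rw [show aGo ('\'' :: rest) off true = aGo rest (off + 1) false from by
          simp [aGo]]
        rw [(ih (off + 1)).1, split1_quote]
        congr 1
        simp
    · by_cases hp : c = '%'
      · subst hp
        constructor
        · rw [show aGo ('%' :: rest) off false = off from by simp [aGo]]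
          rw [split1_other '%' rest hq]
          cases hr : (split1 rest).2 with
          | nil => rw [bGo]; simp [find_cons_pct_hit]
          | cons h2 r => rw [bGo]; simp [find_cons_pct_hit]
        · rw [show aGo ('%' :: rest) off true = aGo rest (off + 1) true from by
            simp [aGo]]
          rw [(ih (off + 1)).2, split1_other '%' rest hq]
          cases hr : (split1 rest).2 with
          | nil => simp
          | cons h2 r =>
            push_cast [List.length_cons]
            ring
      · constructor
        · rw [show aGo (c :: rest) off false = aGo rest (off + 1) false from by
            simp [aGo, hq, hp]]
          rw [(ih (off + 1)).1, split1_other c rest hq]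
          rw [bGo_cons_shift c hp]
        · rw [show aGo (c :: rest) off true = aGo rest (off + 1) true from by
            simp [aGo, hq]]
          rw [(ih (off + 1)).2, split1_other c rest hq]
          cases hr : (split1 rest).2 with
          | nil => simp
          | cons h2 r =>
            push_cast [List.length_cons]
            ring

-- ===== VERDICT (by name: the statement is the Claim_ definition above) =====
theorem find_comment_pct_py_spec : Claim_equal_find_comment_pct_py := by
  intro line _
  unfold Spec_find_comment_pct_py find_comment_pct_py find_comment_pct_py_alt
  rw [splitOn_eq_split1]
  exact (main_inv line.toList 0).1
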